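-- pv_equiv track=rewrite | github.com/shuokabe/pyseg | utils.py | segment_sentence_with_boundaries
-- ===== SOURCE A (Python) =====
-- def check_equality(value_left, value_right):
--     '''Check that both given values are equal.'''
--     #if (value_left == value_right):
--     #    pass
--     #else:
--     #    raise ValueError('Both values must be equal; '
--     #                     f'currently {value_left} and {value_right}.')
--     assert (value_left == value_right), ('Both values must be equal; '
--                          f'currently {value_left} and {value_right}.')
--
-- def segment_sentence_with_boundaries(sentence, boundaries):
--     '''Segment a sentence (string) according to a boundary vector (list).
--
--     sentence is an unsegmented sentence.
--     '''
--     segmented_list = []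
--     beg = 0
--     #pos = 0
--     end = len(sentence)
--     check_equality(end, len(boundaries))
--     #for boundary in boundaries:
--     #    if boundary: # If there is a boundary
--     #        segmented_list += [sentence[beg:(pos + 1)]]
--     #        beg = pos + 1
--     #    pos += 1
--     while beg < end:
--         pos = boundaries.index(True, beg)
--         segmented_list.append(sentence[beg:(pos + 1)])
--         beg = pos + 1
--     return segmented_list
-- ===== SOURCE B (Python) =====
-- def segment_sentence_with_boundaries(sentence, boundaries):
--     '''Segment a sentence (string) according to a boundary vector (list).
--
--     sentence is an unsegmented sentence.
--     '''
--     assert (len(sentence) == len(boundaries)), ('Both values must be equal; '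
--                          f'currently {len(sentence)} and {len(boundaries)}.')
--     if boundaries and not boundaries[-1]:
--         raise ValueError('boundary vector must close the last segment')
--     cuts = [i + 1 for i, b in enumerate(boundaries) if b]
--     return [sentence[a:b] for a, b in zip([0] + cuts, cuts)]
-- ===== Notes on version B (the rewrite author's own statement) =====
-- stated objective: simpler
-- what changed: Two staged passes instead of A's cursor loop of repeated boundaries.index(True, beg) scans: validate the boundary vector up front, collect all cut positions (i+1 at each True), then slice the sentence between consecutive cut points with a pairwise zip; Pre_ excludes exactly the inputs where both raise (length mismatch, or a boundary vector that does not close the last segment).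
import Mathlib
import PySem

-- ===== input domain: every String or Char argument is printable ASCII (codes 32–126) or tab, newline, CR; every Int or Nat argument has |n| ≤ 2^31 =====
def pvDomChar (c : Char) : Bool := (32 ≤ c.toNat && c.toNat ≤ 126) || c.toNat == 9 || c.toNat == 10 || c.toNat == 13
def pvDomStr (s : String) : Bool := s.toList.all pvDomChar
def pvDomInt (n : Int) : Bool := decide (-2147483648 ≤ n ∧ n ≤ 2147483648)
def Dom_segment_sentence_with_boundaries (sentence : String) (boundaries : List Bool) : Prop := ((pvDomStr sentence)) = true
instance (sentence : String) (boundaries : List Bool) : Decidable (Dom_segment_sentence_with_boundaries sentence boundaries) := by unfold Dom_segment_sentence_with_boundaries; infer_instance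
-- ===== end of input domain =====

-- B replaces A's cursor loop of repeated boundaries.index(True, beg) scans with two staged
-- passes: collect all cut positions, then slice between consecutive cuts (simpler).

-- ===== PORT A =====
-- A's while-loop: `pos = boundaries.index(True, beg)` is `index?` on the suffix `boundaries[beg:]`
-- shifted by `beg` (exact for 0 ≤ beg); `none` is Python's ValueError, excluded by Pre_.
def segAloop (s : List Char) (bs : List Bool) (beg : Nat) (acc : List String) : List String :=
  if beg < s.length then
    match PySem.List.index? (bs.drop beg) true with
    | some i =>
        -- sentence[beg:(pos + 1)] with pos = beg + i
        segAloop s bs (beg + i + 1)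
          (acc ++ [String.ofList (PySem.List.slice s (some (beg : Int)) (some ((beg : Int) + (i : Int) + 1)))])
    | none => acc  -- Python raises ValueError here (outside Pre_)
  else acc
termination_by s.length - beg
decreasing_by omega

def segment_sentence_with_boundaries (sentence : String) (boundaries : List Bool) : List String :=
  -- check_equality(end, len(boundaries)): the assert raises when lengths differ (outside Pre_)
  segAloop sentence.toList boundaries 0 []

-- ===== PORT B =====
def segment_sentence_with_boundaries_alt (sentence : String) (boundaries : List Bool) : List String :=
  -- the assert and the up-front boundary-vector validation raise outside Pre_
  -- cuts = [i + 1 for i, b in enumerate(boundaries) if b]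
  let cuts : List Int :=
    ((PySem.List.enumerate boundaries 0).filter (fun p => p.2)).map (fun p => p.1 + 1)
  -- [sentence[a:b] for a, b in zip([0] + cuts, cuts)]
  (List.zip ((0 : Int) :: cuts) cuts).map
    (fun p => String.ofList (PySem.List.slice sentence.toList (some p.1) (some p.2)))

-- ===== PRECONDITION & SPEC =====
-- Pre_ excludes exactly the inputs where Python A raises (no value to match):
-- AssertionError when the lengths differ, and ValueError (`index` finds no True for the
-- trailing segment) when the boundary list ends in False.
def Pre_segment_sentence_with_boundaries (sentence : String) (boundaries : List Bool) : Prop :=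
  sentence.toList.length = boundaries.length ∧ boundaries.getLast? ≠ some false
instance (sentence : String) (boundaries : List Bool) : Decidable (Pre_segment_sentence_with_boundaries sentence boundaries) := by unfold Pre_segment_sentence_with_boundaries; infer_instance

def pvWitness_segment_sentence_with_boundaries : String × List Bool := ("ab", [false, true])

def Spec_segment_sentence_with_boundaries (sentence : String) (boundaries : List Bool) (out : List String) : Prop := out = segment_sentence_with_boundaries_alt sentence boundaries
instance (sentence : String) (boundaries : List Bool) (out : List String) : Decidable (Spec_segment_sentence_with_boundaries sentence boundaries out) := by unfold Spec_segment_sentence_with_boundaries; infer_instance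

-- ===== CLAIM (what is proved, stated in full; the proofs are below) =====
def Claim_equal_segment_sentence_with_boundaries : Prop := ∀ (sentence : String) (boundaries : List Bool), Dom_segment_sentence_with_boundaries sentence boundaries → Pre_segment_sentence_with_boundaries sentence boundaries → Spec_segment_sentence_with_boundaries sentence boundaries (segment_sentence_with_boundaries sentence boundaries)

-- ===== LEMMAS AND PROOFS =====

-- Proof-only intermediate form: one step of an element-wise sweep over enumerate(boundaries)
-- with state (beg, segmented_list); both ports are related to a fold of this step.
def segBstep (s : List Char) (st : Int × List String) (p : Int × Bool) : Int × List String :=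
  if p.2 then
    (p.1 + 1, st.2 ++ [String.ofList (PySem.List.slice s (some st.1) (some (p.1 + 1)))])
  else st

-- the cut positions contributed by the boundary suffix bs enumerated from offset k
def cutsFrom (bs : List Bool) (k : Int) : List Int :=
  ((PySem.List.enumerate bs k).filter (fun p => p.2)).map (fun p => p.1 + 1)

-- Invariant: A's jump-to-next-True loop from `beg` equals the element-wise sweep from scan
-- position k, provided beg ≤ k and no True occurs in boundaries[beg:k].
lemma seg_main (s : List Char) (bs : List Bool) (hlen : bs.length = s.length) :
    ∀ (n k beg : Nat) (acc : List String), bs.length - k = n → beg ≤ k → k ≤ bs.length →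
      true ∉ (bs.drop beg).take (k - beg) →
      segAloop s bs beg acc =
        (List.foldl (segBstep s) ((beg : Int), acc) (PySem.List.enumerate (bs.drop k) (k : Int))).2 := by
  intro n
  induction n with
  | zero =>
      intro k beg acc hn hbk hkl htr
      have hk : k = bs.length := by omega
      have hdrop : bs.drop k = [] := by simp [hk]
      have hwin : (bs.drop beg).take (k - beg) = bs.drop beg := by
        apply List.take_of_length_le; simp; omega
      rw [hwin] at htr
      rw [hdrop, PySem.List.enumerate_nil]
      simp only [List.foldl_nil]
      rw [segAloop]
      by_cases h : beg < s.length
      · simp only [h, if_true]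
        have : PySem.List.index? (bs.drop beg) true = none := by
          rw [PySem.List.index?_eq_none_iff]; exact htr
        rw [this]
      · simp [h]
  | succ m ih =>
      intro k beg acc hn hbk hkl htr
      have hklt : k < bs.length := by omega
      have hdrop : bs.drop k = bs[k] :: bs.drop (k + 1) := List.drop_eq_getElem_cons hklt
      rw [hdrop, PySem.List.enumerate_cons]
      simp only [List.foldl_cons]
      by_cases hb : bs[k] = true
      · -- boundary at k: both sides emit sentence[beg:k+1]
        -- A: index? on boundaries[beg:] finds position k - beg
        have hwinlen : ((bs.drop beg).take (k - beg)).length = k - beg := by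
          simp; omega
        have hsplit : bs.drop beg = (bs.drop beg).take (k - beg) ++ true :: bs.drop (k + 1) := by
          conv_lhs => rw [← List.take_append_drop (k - beg) (bs.drop beg)]
          congr 1
          rw [List.drop_drop]
          have h2 : beg + (k - beg) = k := by omega
          rw [h2, hdrop, hb]
        have hidx : PySem.List.index? (bs.drop beg) true = some (k - beg) := by
          rw [PySem.List.index?_eq_some_iff]
          exact ⟨_, _, hsplit, hwinlen, htr⟩
        rw [segAloop]
        have hblt : beg < s.length := by omega
        simp only [hblt, if_true, hidx]
        have hstep : segBstep s ((beg : Int), acc) ((k : Int), bs[k]) =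
            ((k : Int) + 1, acc ++ [String.ofList (PySem.List.slice s (some (beg : Int)) (some ((k : Int) + 1)))]) := by
          simp [segBstep, hb]
        rw [hstep]
        have hbounds : (beg : Int) + ((k - beg : Nat) : Int) + 1 = (k : Int) + 1 := by
          omega
        rw [hbounds]
        have hbeg' : beg + (k - beg) + 1 = k + 1 := by omega
        rw [hbeg']
        have := ih (k + 1) (k + 1) (acc ++ [String.ofList (PySem.List.slice s (some (beg : Int)) (some ((k : Int) + 1)))])
          (by omega) (by omega) (by omega) (by simp)
        rw [this]
        norm_cast
      · -- no boundary at k: the sweep step is the identity, A is unchanged; extend the window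
        have hb' : bs[k] = false := by simpa using hb
        have hstep : segBstep s ((beg : Int), acc) ((k : Int), bs[k]) = ((beg : Int), acc) := by
          simp [segBstep, hb']
        rw [hstep]
        have htr' : true ∉ (bs.drop beg).take (k + 1 - beg) := by
          have h1 : k + 1 - beg = (k - beg) + 1 := by omega
          rw [h1, List.take_add_one]
          intro hmem
          rcases List.mem_append.mp hmem with h | h
          · exact htr h
          · have hget : (bs.drop beg)[k - beg]? = some bs[k] := by
              rw [List.getElem?_drop]
              have : beg + (k - beg) = k := by omega
              rw [this, List.getElem?_eq_getElem hklt]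
            rw [hget] at h
            simp [hb'] at h
        have := ih (k + 1) beg acc (by omega) (by omega) (by omega) htr'
        rw [this]
        norm_cast

-- The element-wise sweep equals B's zip-of-consecutive-cuts form, for any start state.
lemma foldB_zip (s : List Char) :
    ∀ (bs : List Bool) (k beg : Int) (acc : List String),
      (List.foldl (segBstep s) (beg, acc) (PySem.List.enumerate bs k)).2
        = acc ++ (List.zip (beg :: cutsFrom bs k) (cutsFrom bs k)).map
            (fun p => String.ofList (PySem.List.slice s (some p.1) (some p.2))) := by
  intro bs
  induction bs with
  | nil => intro k beg acc; simp [PySem.List.enumerate_nil, cutsFrom]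
  | cons b bs ih =>
      intro k beg acc
      rw [PySem.List.enumerate_cons]
      simp only [List.foldl_cons]
      by_cases hb : b = true
      · have hstep : segBstep s (beg, acc) (k, b) =
            (k + 1, acc ++ [String.ofList (PySem.List.slice s (some beg) (some (k + 1)))]) := by
          simp [segBstep, hb]
        have hcuts : cutsFrom (b :: bs) k = (k + 1) :: cutsFrom bs (k + 1) := by
          simp [cutsFrom, PySem.List.enumerate_cons, hb]
        rw [hstep, ih (k + 1) (k + 1), hcuts]
        simp [List.zip]
      · have hb' : b = false := by simpa using hb
        have hstep : segBstep s (beg, acc) (k, b) = (beg, acc) := by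
          simp [segBstep, hb']
        have hcuts : cutsFrom (b :: bs) k = cutsFrom bs (k + 1) := by
          simp [cutsFrom, PySem.List.enumerate_cons, hb']
        rw [hstep, ih (k + 1) beg, hcuts]

-- ===== VERDICT (by name: the statement is the Claim_ definition above) =====
theorem segment_sentence_with_boundaries_spec : Claim_equal_segment_sentence_with_boundaries := by
  intro sentence boundaries _ hpre
  unfold Spec_segment_sentence_with_boundaries
  unfold segment_sentence_with_boundaries segment_sentence_with_boundaries_alt
  have hlen : boundaries.length = sentence.toList.length := hpre.1.symm
  have h1 := seg_main sentence.toList boundaries hlen boundaries.length 0 0 [] rfl (by omega) (by omega) (by simp)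
  have h2 := foldB_zip sentence.toList boundaries 0 0 []
  simp only [List.drop_zero, Nat.cast_zero] at h1
  rw [h1, h2, cutsFrom]
  simp
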